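-- pv_equiv track=rewrite | github.com/KwonTaeJunDS/KIT_competition_project | src/backend/api/routers/today.py | _top_topic_labels
-- ===== SOURCE A (Python) =====
-- def _format_topic_label(concept_key: object) -> str:
--     raw = str(concept_key or "").strip()
--     if not raw:
--         return ""
--
--     if "_" not in raw:
--         return raw
--
--     era, concept = raw.split("_", 1)
--     era = era.strip()
--     concept = concept.strip()
--
--     if not concept or concept == era:
--         return era or concept
--     if not era or era == "미분류":
--         return concept
--     return f"{era} {concept}"
--
-- def _top_topic_labels(keys: list[str], limit: int = 3) -> list[str]:
--     topics: list[str] = []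
--     seen: set[str] = set()
--
--     for key in keys:
--         label = _format_topic_label(key)
--         if not label or label in seen:
--             continue
--         topics.append(label)
--         seen.add(label)
--         if len(topics) >= limit:
--             break
--
--     return topics
-- ===== SOURCE B (Python) =====
-- def _format_topic_label(concept_key: object) -> str:
--     raw = str(concept_key or "").strip()
--     if not raw:
--         return ""
--
--     if "_" not in raw:
--         return raw
--
--     era, concept = raw.split("_", 1)
--     era = era.strip()
--     concept = concept.strip()
--
--     if not concept or concept == era:
--         return era or concept
--     if not era or era == "미분류":
--         return concept
--     return f"{era} {concept}"
--
--
-- def _top_topic_labels(keys: list[str], limit: int = 3) -> list[str]: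
--     # Selection-by-pruning: repeatedly take the first nonempty label from a
--     # worklist, then delete every later copy of it; no seen-set, no membership
--     # test against the output.
--     out: list[str] = []
--     remaining = [_format_topic_label(key) for key in keys]
--     while remaining and len(out) < limit:
--         head, rest = remaining[0], remaining[1:]
--         if head:
--             out.append(head)
--             remaining = [l for l in rest if l != head]
--         else:
--             remaining = rest
--     return out
-- ===== Notes on version B (the rewrite author's own statement) =====
-- stated objective: alternative
-- what changed: Replaces A's single-pass seen-set filter loop with early break by a selection-by-pruning worklist: format all labels once, then repeatedly take the first nonempty label of the worklist and delete all its later duplicates from the worklist, so no seen-set or membership test against earlier output exists at all.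
-- intended difference: For limit <= 0 with at least one key whose formatted label is nonempty, A returns a one-element list (its break check runs only after appending the first label) while B returns an empty list, the intended result when no topics are requested. — e.g. on _top_topic_labels(["x"], 0): A returns ["x"], B returns []
import Mathlib
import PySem

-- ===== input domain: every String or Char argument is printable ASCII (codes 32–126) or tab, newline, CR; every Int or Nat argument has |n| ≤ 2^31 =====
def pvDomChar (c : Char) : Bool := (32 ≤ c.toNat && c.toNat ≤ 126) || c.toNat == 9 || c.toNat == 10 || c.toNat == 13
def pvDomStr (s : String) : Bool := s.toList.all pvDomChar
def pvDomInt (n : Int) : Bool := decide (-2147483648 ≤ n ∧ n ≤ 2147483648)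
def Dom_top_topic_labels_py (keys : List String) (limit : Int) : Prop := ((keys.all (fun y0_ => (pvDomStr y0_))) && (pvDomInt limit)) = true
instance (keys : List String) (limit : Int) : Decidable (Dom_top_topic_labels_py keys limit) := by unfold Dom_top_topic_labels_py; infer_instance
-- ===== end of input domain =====

-- B replaces A's seen-set filter loop (with early break) by a selection-by-pruning worklist
-- (take first nonempty label, delete its later duplicates); objective: alternative structure
-- (B does more work than A on large inputs: O(n*min(limit, distinct)) vs A's O(n)).
-- For limit ≤ 0 B returns an empty list while A can return one label (stated as D_ below).

-- ===== PORT A =====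
-- shared helper: _format_topic_label (identical in A and B)
def fmtLabel (concept_key : String) : String :=
  let raw := PySem.Str.strip concept_key   -- str(key or "").strip(): for a str argument, `key or ""` is key itself
  if raw = "" then ""
  else if !(PySem.Str.isIn "_" raw) then raw
  else
    match PySem.Str.splitMax? raw "_" 1 with
    | some (era0 :: concept0 :: _) =>
      let era := PySem.Str.strip era0
      let concept := PySem.Str.strip concept0
      if concept = "" ∨ concept = era then (if era = "" then concept else era)  -- `era or concept`
      else if era = "" ∨ era = "미분류" then concept
      else PySem.Str.join " " [era, concept]   -- f"{era} {concept}"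
    | _ => ""  -- unreachable: '_' in raw guarantees two parts (the Python unpack cannot fail here)

def loopA (limit : Int) (keys : List String) (topics : List String) (seen : PySem.Set String) : List String :=
  match keys with
  | [] => topics
  | key :: rest =>
    let label := fmtLabel key
    if label = "" ∨ PySem.Set.contains seen label then loopA limit rest topics seen
    else
      let topics' := topics ++ [label]
      let seen' := PySem.Set.add seen label
      if limit ≤ (topics'.length : Int) then topics' else loopA limit rest topics' seen'

def top_topic_labels_py (keys : List String) (limit : Int) : List String :=
  loopA limit keys [] PySem.Set.empty

-- ===== PORT B =====
-- the while-loop of Source B: worklist of labels, output accumulator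
def altLoop (remaining : List String) (out : List String) (limit : Int) : List String :=
  match remaining with
  | [] => out
  | head :: rest =>
    if limit ≤ (out.length : Int) then out
    else if head = "" then altLoop rest out limit
    else altLoop (rest.filter (fun l => l != head)) (out ++ [head]) limit
termination_by remaining.length
decreasing_by
  · simp
  · have := List.length_filter_le (fun l => l != head) rest
    simp; omega

def top_topic_labels_py_alt (keys : List String) (limit : Int) : List String :=
  altLoop (keys.map fmtLabel) [] limit

-- ===== PRECONDITION & SPEC =====
-- For limit ≤ 0 with at least one key whose label formats nonempty, A still returns a
-- one-element list (the break check runs only after appending), while B returns an empty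
-- list, the intended value when no topics are requested.
def D_top_topic_labels_py (keys : List String) (limit : Int) : Prop :=
  limit ≤ 0 ∧ ∃ k ∈ keys, PySem.Str.strip k ≠ "" ∧ PySem.Str.strip k ≠ "_"
instance (keys : List String) (limit : Int) : Decidable (D_top_topic_labels_py keys limit) := by
  unfold D_top_topic_labels_py; infer_instance

def Spec_top_topic_labels_py (keys : List String) (limit : Int) (out : List String) : Prop :=
  ¬ D_top_topic_labels_py keys limit → out = top_topic_labels_py_alt keys limit
instance (keys : List String) (limit : Int) (out : List String) : Decidable (Spec_top_topic_labels_py keys limit out) := by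
  unfold Spec_top_topic_labels_py; infer_instance

def pvDiffWitness_top_topic_labels_py : List String × Int := (["x"], 0)
def pvDiffWitnessOut_top_topic_labels_py : (List String) × (List String) := (["x"], [])

-- ===== CLAIM (what is proved, stated in full; the proofs are below) =====
def Claim_unchanged_top_topic_labels_py : Prop := ∀ (keys : List String) (limit : Int), Dom_top_topic_labels_py keys limit → Spec_top_topic_labels_py keys limit (top_topic_labels_py keys limit)
def Claim_exact_top_topic_labels_py : Prop := ∀ (keys : List String) (limit : Int), Dom_top_topic_labels_py keys limit → D_top_topic_labels_py keys limit → top_topic_labels_py keys limit ≠ top_topic_labels_py_alt keys limit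
def Claim_changed_top_topic_labels_py : Prop := Dom_top_topic_labels_py (pvDiffWitness_top_topic_labels_py.1) (pvDiffWitness_top_topic_labels_py.2) ∧ D_top_topic_labels_py (pvDiffWitness_top_topic_labels_py.1) (pvDiffWitness_top_topic_labels_py.2) ∧ top_topic_labels_py (pvDiffWitness_top_topic_labels_py.1) (pvDiffWitness_top_topic_labels_py.2) = pvDiffWitnessOut_top_topic_labels_py.1 ∧ top_topic_labels_py_alt (pvDiffWitness_top_topic_labels_py.1) (pvDiffWitness_top_topic_labels_py.2) = pvDiffWitnessOut_top_topic_labels_py.2 ∧ pvDiffWitnessOut_top_topic_labels_py.1 ≠ pvDiffWitnessOut_top_topic_labels_py.2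

-- ===== LEMMAS AND PROOFS =====

-- the deduped nonempty labels (first-occurrence order), seen-set formulation (A's shape)
def ddn : List String → PySem.Set String → List String
  | [], _ => []
  | l :: rest, seen =>
    if l = "" ∨ PySem.Set.contains seen l then ddn rest seen
    else l :: ddn rest (PySem.Set.add seen l)

-- the same list, pruning formulation (B's shape)
def ddl : List String → List String
  | [] => []
  | l :: rest =>
    if l = "" then ddl rest else l :: ddl (rest.filter (fun x => x != l))
termination_by ls => ls.length
decreasing_by
  · simp
  · have := List.length_filter_le (fun x => x != l) rest
    simp; omega

theorem ddl_nil : ddl [] = [] := by rw [ddl]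

theorem ddl_cons (l : String) (rest : List String) :
    ddl (l :: rest) = if l = "" then ddl rest else l :: ddl (rest.filter (fun x => x != l)) := by
  rw [ddl]

theorem altLoop_nil (out : List String) (limit : Int) : altLoop [] out limit = out := by
  rw [altLoop]

theorem altLoop_cons (head : String) (rest out : List String) (limit : Int) :
    altLoop (head :: rest) out limit =
      if limit ≤ (out.length : Int) then out
      else if head = "" then altLoop rest out limit
      else altLoop (rest.filter (fun l => l != head)) (out ++ [head]) limit := by
  rw [altLoop]

theorem contains_add_eq (seen : PySem.Set String) (l x : String) :
    PySem.Set.contains (PySem.Set.add seen l) x = (PySem.Set.contains seen x || x == l) := by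
  by_cases hx : x ∈ seen <;> by_cases hxl : x = l <;>
    (simp [PySem.Set.add_eq_ite, hx, hxl]; try (split <;> simp_all))

theorem ddn_prune (l : String) (ls : List String) :
    ∀ seen, PySem.Set.contains seen l = true →
    ddn (ls.filter (fun x => x != l)) seen = ddn ls seen := by
  induction ls with
  | nil => intro seen _; rfl
  | cons x rest ih =>
    intro seen hs
    by_cases hxl : x = l
    · subst hxl
      rw [List.filter_cons_of_neg (by simp)]
      rw [ih seen hs, ddn, if_pos (Or.inr hs)]
    · rw [List.filter_cons_of_pos (by simp [hxl])]
      rw [ddn, ddn]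
      by_cases hsk : x = "" ∨ PySem.Set.contains seen x
      · rw [if_pos hsk, if_pos hsk]; exact ih seen hs
      · rw [if_neg hsk, if_neg hsk]
        rw [ih (PySem.Set.add seen x) (by rw [contains_add_eq, hs]; simp)]

theorem ddn_eq_ddl (n : Nat) : ∀ (ls : List String), ls.length ≤ n →
    ∀ seen, (∀ x ∈ ls, PySem.Set.contains seen x = false) → ddn ls seen = ddl ls := by
  induction n with
  | zero =>
    intro ls hn seen _
    have hls : ls = [] := List.length_eq_zero_iff.mp (Nat.le_zero.mp hn)
    subst hls
    rw [ddl_nil]; rfl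
  | succ m ih =>
    intro ls hn seen h
    cases ls with
    | nil => rw [ddl_nil]; rfl
    | cons l rest =>
      rw [ddn, ddl_cons]
      by_cases hl : l = ""
      · rw [if_pos hl, if_pos (Or.inl hl)]
        exact ih rest (by simp at hn; omega) seen
          (fun x hx => h x (List.mem_cons_of_mem _ hx))
      · rw [if_neg hl,
          if_neg (by rw [h l (List.mem_cons_self ..)]; simp [hl])]
        congr 1
        rw [← ddn_prune l rest (PySem.Set.add seen l) (by rw [contains_add_eq]; simp)]
        have hflen : (rest.filter (fun x => x != l)).length ≤ m := by
          have := List.length_filter_le (fun x => x != l) rest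
          simp at hn; omega
        refine ih _ hflen _ (fun x hx => ?_)
        have hx' := List.mem_filter.mp hx
        rw [contains_add_eq, h x (List.mem_cons_of_mem _ hx'.1)]
        simpa using hx'.2

theorem loopA_eq (limit : Int) (keys : List String) :
    ∀ (topics : List String) (seen : PySem.Set String),
    (topics.length : Int) < limit →
    loopA limit keys topics seen
      = topics ++ (ddn (keys.map fmtLabel) seen).take (limit.toNat - topics.length) := by
  induction keys with
  | nil => intro topics seen h; simp [loopA, ddn]
  | cons k rest ih =>
    intro topics seen h
    rw [loopA, List.map_cons, ddn]
    by_cases hskip : fmtLabel k = "" ∨ PySem.Set.contains seen (fmtLabel k)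
    · simp only [hskip, if_pos]; exact ih topics seen h
    · simp only [hskip, if_neg, not_false_iff]
      have hone : limit.toNat - topics.length = (limit.toNat - (topics.length + 1)) + 1 := by omega
      by_cases hfull : limit ≤ ((topics ++ [fmtLabel k]).length : Int)
      · simp only [hfull, if_pos]
        have : limit.toNat - topics.length = 1 := by
          simp only [List.length_append, List.length_cons, List.length_nil] at hfull; omega
        rw [this, List.take_succ_cons, List.take_zero]
      · simp only [hfull, if_neg, not_false_iff]
        have h' : (((topics ++ [fmtLabel k]).length : Nat) : Int) < limit := by
          simp only [List.length_append, List.length_cons, List.length_nil] at hfull ⊢; omega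
        rw [ih _ _ h']
        have hlen : (topics ++ [fmtLabel k]).length = topics.length + 1 := by simp
        rw [hlen, hone, List.take_succ_cons, List.append_assoc]
        rfl

theorem altLoop_full (ls out : List String) (limit : Int) (h : limit ≤ (out.length : Int)) :
    altLoop ls out limit = out := by
  cases ls with
  | nil => rw [altLoop_nil]
  | cons head rest => rw [altLoop_cons, if_pos h]

theorem altLoop_eq (n : Nat) : ∀ (ls : List String), ls.length ≤ n →
    ∀ (out : List String) (limit : Int), (out.length : Int) < limit →
    altLoop ls out limit = out ++ (ddl ls).take (limit.toNat - out.length) := by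
  induction n with
  | zero =>
    intro ls hn out limit h
    have hls : ls = [] := List.length_eq_zero_iff.mp (Nat.le_zero.mp hn)
    subst hls
    rw [altLoop_nil, ddl_nil]
    simp
  | succ m ih =>
    intro ls hn out limit h
    cases ls with
    | nil => rw [altLoop_nil, ddl_nil]; simp
    | cons l rest =>
      rw [altLoop_cons, if_neg (by omega), ddl_cons]
      by_cases hl : l = ""
      · rw [if_pos hl, if_pos hl]
        exact ih rest (by simp at hn; omega) out limit h
      · rw [if_neg hl, if_neg hl]
        have hone : limit.toNat - out.length = (limit.toNat - (out.length + 1)) + 1 := by omega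
        by_cases hfull : limit ≤ ((out ++ [l]).length : Int)
        · rw [altLoop_full _ _ _ hfull]
          have : limit.toNat - out.length = 1 := by
            simp only [List.length_append, List.length_cons, List.length_nil] at hfull; omega
          rw [this, List.take_succ_cons, List.take_zero]
        · have h' : (((out ++ [l]).length : Nat) : Int) < limit := by
            simp only [List.length_append, List.length_cons, List.length_nil] at hfull ⊢; omega
          have hflen : (rest.filter (fun x => x != l)).length ≤ m := by
            have := List.length_filter_le (fun x => x != l) rest
            simp at hn; omega
          rw [ih _ hflen _ _ h']
          have hlen : (out ++ [l]).length = out.length + 1 := by simp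
          rw [hlen, hone, List.take_succ_cons, List.append_assoc]
          rfl

theorem altLoop_nonpos (ls : List String) (limit : Int) (h : limit ≤ 0) :
    altLoop ls [] limit = [] :=
  altLoop_full ls [] limit (by simpa using h)

theorem loopA_all_empty (limit : Int) (keys : List String) (topics : List String)
    (seen : PySem.Set String) (h : ∀ k ∈ keys, fmtLabel k = "") :
    loopA limit keys topics seen = topics := by
  induction keys with
  | nil => rfl
  | cons k rest ih =>
    rw [loopA]
    simp only [h k (List.mem_cons_self ..), true_or, if_pos]
    exact ih (fun x hx => h x (List.mem_cons_of_mem _ hx))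

theorem fmt_empty (k : String)
    (h : PySem.Str.strip k = "" ∨ PySem.Str.strip k = "_") : fmtLabel k = "" := by
  rcases h with h | h <;> (rw [fmtLabel, h]; decide)


-- ---- tightness: inside D_ the two ports differ everywhere ----

theorem go_zero (q : List Char) (f : Nat) (hf : 1 ≤ f) (acc : List (List Char)) :
    PySem.Chars.splitOnMax.go ['_'] f 0 q [] acc = (q :: acc).reverse := by
  obtain ⟨g, rfl⟩ : ∃ g, f = g + 1 := ⟨f - 1, by omega⟩
  cases q <;> (rw [PySem.Chars.splitOnMax.go.eq_def]; simp)

theorem go_one (q : List Char) : ∀ (p : List Char), (('_':Char) ∉ p) →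
    ∀ (fuel : Nat) (cur : List Char) (acc : List (List Char)), p.length + 2 ≤ fuel →
    PySem.Chars.splitOnMax.go ['_'] fuel 1 (p ++ '_' :: q) cur acc
      = (q :: (cur.reverse ++ p) :: acc).reverse := by
  intro p
  induction p with
  | nil =>
    intro _ fuel cur acc hf
    obtain ⟨f, rfl⟩ : ∃ f, fuel = f + 1 := ⟨fuel - 1, by omega⟩
    rw [PySem.Chars.splitOnMax.go.eq_def]
    simp only [List.nil_append, List.isPrefixOf, beq_self_eq_true, Bool.true_and,
      if_true, if_neg (by omega : ¬ (1:Nat) = 0)]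
    rw [show List.drop ['_'].length ('_' :: q) = q from rfl]
    rw [go_zero q f (by omega)]
    simp
  | cons c p' ih =>
    intro hp fuel cur acc hf
    obtain ⟨f, rfl⟩ : ∃ f, fuel = f + 1 := ⟨fuel - 1, by omega⟩
    rw [PySem.Chars.splitOnMax.go.eq_def]
    have hc : (('_':Char) == c) = false := by
      simp only [List.mem_cons, not_or] at hp
      exact beq_eq_false_iff_ne.mpr hp.1
    simp only [List.cons_append, List.isPrefixOf, hc, Bool.false_and,
      if_neg (by omega : ¬ (1:Nat) = 0), Bool.false_eq_true, if_false]
    rw [ih (by simp_all) f (c :: cur) acc (by simp at hf ⊢; omega)]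
    simp

theorem split_two (x : String) (p q : List Char) (hx : x.toList = p ++ '_' :: q)
    (hp : ('_':Char) ∉ p) :
    PySem.Str.splitMax? x "_" 1 = some [String.ofList p, String.ofList q] := by
  rw [PySem.Str.splitMax?, PySem.Chars.splitMax?]
  rw [show ("_" : String).toList = ['_'] from rfl]
  rw [if_neg (by simp)]
  rw [PySem.Chars.splitOnMax, if_neg (by omega)]
  rw [hx, show Int.toNat 1 = 1 from rfl, go_one q p hp _ [] [] (by simp)]
  simp

theorem strip_nil_iff (y : List Char) :
    PySem.Chars.strip y = [] ↔ ∀ c ∈ y, PySem.Chars.isspace c = true := by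
  unfold PySem.Chars.strip PySem.Chars.rstrip PySem.Chars.lstrip
  rw [List.reverse_eq_nil_iff, List.dropWhile_eq_nil_iff]
  constructor
  · intro h c hc
    rw [← List.takeWhile_append_dropWhile (p := PySem.Chars.isspace) (l := y)] at hc
    rcases List.mem_append.mp hc with h1 | h2
    · exact List.mem_takeWhile_imp h1
    · exact h c (List.mem_reverse.mpr h2)
  · intro h c hc
    exact h c ((List.dropWhile_sublist _).subset (List.mem_reverse.mp hc))

theorem lstrip_fix (y : List Char) :
    List.dropWhile PySem.Chars.isspace (PySem.Chars.lstrip y) = PySem.Chars.lstrip y :=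
  List.dropWhile_idempotent _ _

theorem strip_decomp (y : List Char) :
    ∃ w, (∀ c ∈ w, PySem.Chars.isspace c = true) ∧
      PySem.Chars.lstrip y = PySem.Chars.strip y ++ w := by
  refine ⟨(List.takeWhile PySem.Chars.isspace (PySem.Chars.lstrip y).reverse).reverse, ?_, ?_⟩
  · intro c hc; exact List.mem_takeWhile_imp (List.mem_reverse.mp hc)
  · unfold PySem.Chars.strip PySem.Chars.rstrip
    conv_lhs => rw [← List.reverse_reverse (PySem.Chars.lstrip y)]
    rw [← List.reverse_append]
    rw [← List.takeWhile_append_dropWhile (p := PySem.Chars.isspace)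
      (l := (PySem.Chars.lstrip y).reverse)]
    simp

theorem strip_head_not_space (y : List Char) (c : Char) (l : List Char)
    (h : PySem.Chars.strip y = c :: l) : PySem.Chars.isspace c = false := by
  by_contra hc
  rw [Bool.not_eq_false] at hc
  obtain ⟨w, hw, hly⟩ := strip_decomp y
  have hfix := lstrip_fix y
  rw [hly, h] at hfix
  rw [List.cons_append, List.dropWhile_cons_of_pos hc] at hfix
  have := congrArg List.length hfix
  have hle := List.length_dropWhile_le PySem.Chars.isspace (l ++ w)
  simp at this hle
  omega

theorem rstrip_fix (y : List Char) :
    List.dropWhile PySem.Chars.isspace (PySem.Chars.strip y).reverse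
      = (PySem.Chars.strip y).reverse := by
  unfold PySem.Chars.strip PySem.Chars.rstrip
  rw [List.reverse_reverse]
  exact List.dropWhile_idempotent _ _

theorem strip_last_not_space (y : List Char) (c : Char) (l : List Char)
    (h : PySem.Chars.strip y = l ++ [c]) : PySem.Chars.isspace c = false := by
  by_contra hc
  rw [Bool.not_eq_false] at hc
  have hfix := rstrip_fix y
  rw [h, List.reverse_append] at hfix
  simp only [List.reverse_cons, List.reverse_nil, List.nil_append, List.singleton_append] at hfix
  rw [List.dropWhile_cons_of_pos hc] at hfix
  have := congrArg List.length hfix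
  have hle := List.length_dropWhile_le PySem.Chars.isspace l.reverse
  simp at this hle
  omega

theorem toList_nil_iff (s : String) : s = "" ↔ s.toList = [] := by
  constructor
  · intro h; rw [h]; rfl
  · intro h
    have := congrArg String.ofList h
    rwa [String.ofList_toList] at this

theorem no_space_decomp (k : String) (p q : List Char)
    (hx : (PySem.Str.strip k).toList = p ++ '_' :: q)
    (hp : ∀ c ∈ p, PySem.Chars.isspace c = true)
    (hq : ∀ c ∈ q, PySem.Chars.isspace c = true) :
    PySem.Str.strip k = "_" := by
  rw [PySem.Str.toList_strip] at hx
  have hpn : p = [] := by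
    cases p with
    | nil => rfl
    | cons c p' =>
      have := strip_head_not_space k.toList c (p' ++ '_' :: q) (by simpa using hx)
      rw [hp c (List.mem_cons_self ..)] at this
      cases this
  subst hpn
  have hqn : q = [] := by
    rcases q.eq_nil_or_concat with h | ⟨l', c, rfl⟩
    · exact h
    · have := strip_last_not_space k.toList c ('_' :: l') (by simpa using hx)
      rw [hq c (by simp)] at this
      cases this
  subst hqn
  have : (PySem.Str.strip k).toList = ("_" : String).toList := by
    rw [PySem.Str.toList_strip]; simpa using hx
  have := congrArg String.ofList this
  rwa [String.ofList_toList, String.ofList_toList] at this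

theorem fmt_nonempty (k : String) (h1 : PySem.Str.strip k ≠ "")
    (h2 : PySem.Str.strip k ≠ "_") : fmtLabel k ≠ "" := by
  by_cases hin : PySem.Str.isIn "_" (PySem.Str.strip k) = true
  · have hmem : ('_':Char) ∈ (PySem.Str.strip k).toList := by
      have := (PySem.Str.isIn_iff_infix ..).mp hin
      exact this.subset (by simp)
    obtain ⟨p, q, hpq, hp⟩ := List.eq_append_cons_of_mem hmem
    have hsplit := split_two (PySem.Str.strip k) p q hpq hp
    simp only [fmtLabel, if_neg h1, hin, Bool.not_true, Bool.false_eq_true, if_false, hsplit]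
    by_cases hcon : PySem.Str.strip (String.ofList q) = "" ∨
        PySem.Str.strip (String.ofList q) = PySem.Str.strip (String.ofList p)
    · rw [if_pos hcon]
      by_cases hera : PySem.Str.strip (String.ofList p) = ""
      · rw [if_pos hera]
        intro hcq
        -- era and concept both empty: every char of p and q is whitespace
        have hpw : ∀ c ∈ p, PySem.Chars.isspace c = true := by
          have := hera
          rw [toList_nil_iff, PySem.Str.toList_strip, String.toList_ofList] at this
          exact (strip_nil_iff p).mp this
        have hqw : ∀ c ∈ q, PySem.Chars.isspace c = true := by
          have := hcq
          rw [toList_nil_iff, PySem.Str.toList_strip, String.toList_ofList] at hcq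
          exact (strip_nil_iff q).mp hcq
        exact h2 (no_space_decomp k p q (by rwa [PySem.Str.toList_strip] at hpq ⊢) hpw hqw)
      · rw [if_neg hera]; exact hera
    · rw [if_neg hcon]
      push Not at hcon
      by_cases hera2 : PySem.Str.strip (String.ofList p) = "" ∨
          PySem.Str.strip (String.ofList p) = "미분류"
      · rw [if_pos hera2]; exact hcon.1
      · rw [if_neg hera2]
        push Not at hera2
        intro hj
        rw [toList_nil_iff, PySem.Str.toList_join] at hj
        simp only [List.map_cons, List.map_nil] at hj
        rw [show ((" ":String).toList) = [' '] from rfl] at hj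
        rw [show PySem.Chars.join [' ']
            [(PySem.Str.strip (String.ofList p)).toList, (PySem.Str.strip (String.ofList q)).toList]
            = (PySem.Str.strip (String.ofList p)).toList ++ [' ']
              ++ (PySem.Str.strip (String.ofList q)).toList from by
          simp [PySem.Chars.join, List.intercalate]] at hj
        simp at hj
  · -- no underscore: the label is the stripped key itself
    simp only [fmtLabel, if_neg h1]
    rw [Bool.not_eq_true] at hin
    rw [hin]
    simpa using h1

theorem loopA_sing (limit : Int) (hl : limit ≤ 0) :
    ∀ (keys : List String) (topics : List String) (seen : PySem.Set String),
    (∃ k ∈ keys, fmtLabel k ≠ "" ∧ PySem.Set.contains seen (fmtLabel k) = false) →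
    ∃ l, loopA limit keys topics seen = topics ++ [l] := by
  intro keys
  induction keys with
  | nil => intro _ _ h; obtain ⟨k, hk, _⟩ := h; cases hk
  | cons k rest ih =>
    intro topics seen hex
    rw [loopA]
    by_cases hskip : fmtLabel k = "" ∨ PySem.Set.contains seen (fmtLabel k)
    · rw [if_pos hskip]
      apply ih
      obtain ⟨k', hk', h1, h2⟩ := hex
      rcases List.mem_cons.mp hk' with rfl | hmem
      · exfalso; rcases hskip with h | h
        · exact h1 h
        · rw [h2] at h; cases h
      · exact ⟨k', hmem, h1, h2⟩
    · rw [if_neg hskip]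
      rw [if_pos (by simp; omega)]
      exact ⟨fmtLabel k, rfl⟩

-- ===== VERDICT (by name: the statement is the Claim_ definition above) =====
theorem top_topic_labels_py_spec : Claim_unchanged_top_topic_labels_py := by
  intro keys limit _ hnd
  unfold D_top_topic_labels_py at hnd
  push Not at hnd
  rw [top_topic_labels_py, top_topic_labels_py_alt]
  by_cases hl : limit ≤ 0
  · rw [altLoop_nonpos _ _ hl]
    refine loopA_all_empty _ _ _ _ (fun k hk => fmt_empty k ?_)
    by_cases he : PySem.Str.strip k = ""
    · exact Or.inl he
    · exact Or.inr (hnd hl k hk he)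
  · have h0 : ((([] : List String).length : Int)) < limit := by simp; omega
    rw [loopA_eq limit keys [] PySem.Set.empty h0,
        altLoop_eq (keys.map fmtLabel).length (keys.map fmtLabel) le_rfl [] limit h0]
    rw [ddn_eq_ddl (keys.map fmtLabel).length (keys.map fmtLabel) le_rfl PySem.Set.empty (fun x _ => rfl)]

theorem top_topic_labels_py_changed : Claim_changed_top_topic_labels_py := by
  unfold Claim_changed_top_topic_labels_py
  refine ⟨by decide, by decide, by decide, ?_, by decide⟩
  show top_topic_labels_py_alt ["x"] 0 = []
  exact altLoop_nonpos _ _ (by norm_num)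

theorem top_topic_labels_py_tight : Claim_exact_top_topic_labels_py := by
  intro keys limit _ hd
  obtain ⟨hl, k, hk, h1, h2⟩ := hd
  rw [top_topic_labels_py, top_topic_labels_py_alt, altLoop_nonpos _ _ hl]
  obtain ⟨l, hA⟩ := loopA_sing limit hl keys [] PySem.Set.empty
    ⟨k, hk, fmt_nonempty k h1 h2, rfl⟩
  rw [hA]
  simp
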